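-- pv_equiv track=rewrite | github.com/genautech/nasa-safeOutdoor | backend/app/logic/checklist.py | prioritize_checklist
-- ===== SOURCE A (Python) =====
-- from typing import List, Dict
--
-- def prioritize_checklist(checklist: List[str]) -> List[str]:
--     """
--     Prioritize checklist items (essential first).
--
--     Args:
--         checklist: Unordered checklist
--
--     Returns:
--         List[str]: Prioritized checklist
--     """
--     # TODO: Implement priority logic
--     # Essential items first (safety, hydration), then comfort items
--
--     essential = ["First aid kit", "Water", "Phone", "Emergency shelter"]
--     safety = ["Helmet", "N95 mask", "Headlamp"]
--     comfort = []
--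
--     prioritized = []
--
--     for item in checklist:
--         if any(e.lower() in item.lower() for e in essential):
--             prioritized.insert(0, item)
--         elif any(s.lower() in item.lower() for s in safety):
--             prioritized.append(item)
--         else:
--             comfort.append(item)
--
--     return prioritized + comfort
-- ===== SOURCE B (Python) =====
-- from typing import List
--
-- _ESSENTIAL = ["First aid kit", "Water", "Phone", "Emergency shelter"]
-- _SAFETY = ["Helmet", "N95 mask", "Headlamp"]
--
-- def _matches(keys, item):
--     return any(k.lower() in item.lower() for k in keys)
--
-- def prioritize_checklist(checklist: List[str]) -> List[str]:
--     essentials = [x for x in checklist if _matches(_ESSENTIAL, x)]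
--     safety = [x for x in checklist
--               if not _matches(_ESSENTIAL, x) and _matches(_SAFETY, x)]
--     comfort = [x for x in checklist
--                if not _matches(_ESSENTIAL, x) and not _matches(_SAFETY, x)]
--     return essentials[::-1] + safety + comfort
-- ===== Notes on version B (the rewrite author's own statement) =====
-- stated objective: simpler
-- what changed: Replaced A's single loop that mutates one list via insert(0)/append plus a comfort spill-over by three declarative comprehensions (essential / safety / comfort) with the essentials list reversed once at the end to reproduce the front-insertion order.
import Mathlib
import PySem

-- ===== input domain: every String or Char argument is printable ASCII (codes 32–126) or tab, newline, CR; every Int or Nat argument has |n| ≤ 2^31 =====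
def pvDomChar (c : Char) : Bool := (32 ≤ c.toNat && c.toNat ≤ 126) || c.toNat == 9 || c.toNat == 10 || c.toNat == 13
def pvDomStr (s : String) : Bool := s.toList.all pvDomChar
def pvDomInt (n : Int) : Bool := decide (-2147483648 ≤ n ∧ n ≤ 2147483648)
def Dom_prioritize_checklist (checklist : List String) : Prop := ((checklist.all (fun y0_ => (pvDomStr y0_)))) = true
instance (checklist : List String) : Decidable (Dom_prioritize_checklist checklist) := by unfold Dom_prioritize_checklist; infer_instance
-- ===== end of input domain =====

-- B replaces A's single loop with insert(0)/append by three comprehensions and one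
-- reversal (simpler decomposition, same cost); return value only, no mutation involved.

-- shared category test: any(k.lower() in item.lower() for k in keys), used by both Pythons
def pvMatches (keys : List String) (item : String) : Bool :=
  keys.any (fun k => PySem.Str.isIn (PySem.Str.lower k) (PySem.Str.lower item))

def pvEssential : List String := ["First aid kit", "Water", "Phone", "Emergency shelter"]
def pvSafety : List String := ["Helmet", "N95 mask", "Headlamp"]

-- ===== PORT A =====
-- one pass: essentials inserted at position 0, safety appended, others into comfort
def prioritize_checklist (checklist : List String) : List String :=
  let r := checklist.foldl
    (fun (st : List String × List String) item =>
      if pvMatches pvEssential item then (item :: st.1, st.2)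
      else if pvMatches pvSafety item then (st.1 ++ [item], st.2)
      else (st.1, st.2 ++ [item]))
    ([], [])
  r.1 ++ r.2

-- ===== PORT B =====
-- three filters, essentials reversed
def prioritize_checklist_alt (checklist : List String) : List String :=
  (checklist.filter (fun x => pvMatches pvEssential x)).reverse
    ++ checklist.filter (fun x => !pvMatches pvEssential x && pvMatches pvSafety x)
    ++ checklist.filter (fun x => !pvMatches pvEssential x && !pvMatches pvSafety x)

-- ===== PRECONDITION & SPEC =====
def Spec_prioritize_checklist (checklist : List String) (out : List String) : Prop := out = prioritize_checklist_alt checklist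
instance (checklist : List String) (out : List String) : Decidable (Spec_prioritize_checklist checklist out) := by unfold Spec_prioritize_checklist; infer_instance

-- ===== CLAIM (what is proved, stated in full; the proofs are below) =====
def Claim_equal_prioritize_checklist : Prop := ∀ (checklist : List String), Dom_prioritize_checklist checklist → Spec_prioritize_checklist checklist (prioritize_checklist checklist)

-- ===== LEMMAS AND PROOFS =====

-- characterisation of A's loop state for arbitrary initial accumulators
theorem pv_foldl_char (xs : List String) (p c : List String) :
    xs.foldl
      (fun (st : List String × List String) item =>
        if pvMatches pvEssential item then (item :: st.1, st.2)
        else if pvMatches pvSafety item then (st.1 ++ [item], st.2)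
        else (st.1, st.2 ++ [item]))
      (p, c)
    = ((xs.filter (fun x => pvMatches pvEssential x)).reverse ++ p
         ++ xs.filter (fun x => !pvMatches pvEssential x && pvMatches pvSafety x),
       c ++ xs.filter (fun x => !pvMatches pvEssential x && !pvMatches pvSafety x)) := by
  induction xs generalizing p c with
  | nil => simp
  | cons x xs ih =>
    by_cases he : pvMatches pvEssential x
    · simp [he, ih]
    · by_cases hs : pvMatches pvSafety x
      · simp [he, hs, ih]
      · simp [he, hs, ih]

-- ===== VERDICT (by name: the statement is the Claim_ definition above) =====
theorem prioritize_checklist_spec : Claim_equal_prioritize_checklist := by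
  intro checklist _
  unfold Spec_prioritize_checklist prioritize_checklist prioritize_checklist_alt
  rw [pv_foldl_char]
  simp
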